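-- pv_equiv track=rewrite | github.com/HBinhCT/Q-project | hackerearth/Data Structures/Hash Tables/Basics of Hash Tables/Valid pairs/solution.py | solve
-- ===== SOURCE A (Python) =====
-- from collections import defaultdict
--
-- def solve(N, wealth):
--     # Write your code here
--     counter = defaultdict(int)
--     count = 0
--     for i in wealth:
--         p = 1
--         for _ in range(21):  # max is 3^20
--             count += counter[p - i]
--             p *= 3
--         counter[i] += 1
--     return count
-- ===== SOURCE B (Python) =====
-- from collections import Counter
--
--
-- def solve(N, wealth):
--     # Combinatorial rewrite: tally all values once, then for each power of three
--     # p count the pairs value-by-value: C(ca, 2) when a value pairs with itself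
--     # (2a == p), else ca * c[p - a] taken once via the b > a guard.
--     c = Counter(wealth)
--     total = 0
--     p = 1
--     for _ in range(21):  # powers 3^0 .. 3^20
--         for a, ca in c.items():
--             b = p - a
--             if b == a:
--                 total += ca * (ca - 1) // 2
--             elif b > a:
--                 total += ca * c[b]
--         p *= 3
--     return total
-- ===== Notes on version B (the rewrite author's own statement) =====
-- stated objective: faster
-- what changed: Replaces A's streaming pass (for each element, probe the running defaultdict at p - x for all 21 powers of three, then insert the element) with a Counter of all values built once followed by a combinatorial pass over the 21 powers and the distinct values: ca*(ca-1)//2 on the diagonal 2a = p, else ca*c[p-a] counted once via the p-a > a guard.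
import Mathlib
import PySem

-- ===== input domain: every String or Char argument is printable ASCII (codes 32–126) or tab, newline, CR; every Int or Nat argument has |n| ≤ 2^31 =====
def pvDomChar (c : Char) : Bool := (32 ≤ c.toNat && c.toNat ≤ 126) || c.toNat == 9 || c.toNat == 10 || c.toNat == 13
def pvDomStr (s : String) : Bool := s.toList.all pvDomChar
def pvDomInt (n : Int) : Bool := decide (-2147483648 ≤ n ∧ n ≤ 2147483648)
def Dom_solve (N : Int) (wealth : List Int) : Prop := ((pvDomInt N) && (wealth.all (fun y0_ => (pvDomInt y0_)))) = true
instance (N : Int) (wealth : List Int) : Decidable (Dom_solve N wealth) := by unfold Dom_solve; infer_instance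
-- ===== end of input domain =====

-- B replaces A's stream (per element, probe the running counter at p - x for all 21
-- powers of three, then insert) by one full Counter built first and a combinatorial
-- pass over powers × distinct values (C(ca,2) on the diagonal, ca·c[p-a] once via the
-- p-a > a guard); measurably faster by a constant factor (fewer dict operations).

-- ===== PORT A =====
-- inner 'for _ in range(21)' body: count += counter[p - i] (defaultdict: a missing
-- key is inserted with 0 by the read — setdefault), p *= 3; state (counter, count, p)
def stepInnerA (i : Int) (s : PySem.Dict Int Int × Int × Int) :
    PySem.Dict Int Int × Int × Int :=
  (s.1.setdefault (s.2.2 - i) 0,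
   s.2.1 + (s.1.setdefault (s.2.2 - i) 0).getD (s.2.2 - i) 0,
   s.2.2 * 3)

-- outer loop body: run the 21-step inner loop from p = 1, then counter[i] += 1
def stepOuterA (st : PySem.Dict Int Int × Int) (i : Int) : PySem.Dict Int Int × Int :=
  let inner := (PySem.List.pyRange 0 21 1).foldl (fun s _ => stepInnerA i s) (st.1, st.2, 1)
  (inner.1.modify i 0 (· + 1), inner.2.1)

def solve (N : Int) (wealth : List Int) : Int :=
  (wealth.foldl stepOuterA (PySem.Dict.empty, 0)).2

-- ===== PORT B =====
-- body of 'for _ in range(21)': the inner 'for a, ca in c.items()' accumulation, then p *= 3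
def stepB (c : PySem.Dict Int Int) (st : Int × Int) : Int × Int :=
  (c.items.foldl (fun total aca =>
      if st.2 - aca.1 = aca.1 then
        total + PySem.Int.floordiv (aca.2 * (aca.2 - 1)) 2
      else if st.2 - aca.1 > aca.1 then
        total + aca.2 * c.getD (st.2 - aca.1) 0
      else total) st.1,
   st.2 * 3)

def solve_alt (N : Int) (wealth : List Int) : Int :=
  let c : PySem.Dict Int Int := PySem.Dict.counter wealth
  ((PySem.List.pyRange 0 21 1).foldl (fun st _ => stepB c st) (0, 1)).1

-- ===== PRECONDITION & SPEC =====
def Spec_solve (N : Int) (wealth : List Int) (out : Int) : Prop := out = solve_alt N wealth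
instance (N : Int) (wealth : List Int) (out : Int) : Decidable (Spec_solve N wealth out) := by unfold Spec_solve; infer_instance

-- ===== CLAIM (what is proved, stated in full; the proofs are below) =====
def Claim_equal_solve : Prop := ∀ (N : Int) (wealth : List Int), Dom_solve N wealth → Spec_solve N wealth (solve N wealth)

-- ===== LEMMAS AND PROOFS =====

-- the successive values of p: p, 3p, 9p, … (n terms)
def powseq (p : Int) : Nat → List Int
  | 0 => []
  | n + 1 => p :: powseq (p * 3) n

-- B's per-value contribution for target sum p, phrased on the plain list
def hval (xs : List Int) (p a : Int) : Int :=
  if p - a = a then PySem.Int.floordiv ((xs.count a : Int) * ((xs.count a : Int) - 1)) 2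
  else if p - a > a then (xs.count a : Int) * (xs.count (p - a) : Int)
  else 0

-- number of ordered "later element x against earlier element y" hits with y + x = p
def pairsSum (p : Int) : List Int → Int
  | [] => 0
  | x :: r => (r.count (p - x) : Int) + pairsSum p r

-- A's abstract count, one target sum p, prefix pre already seen
def AGp (p : Int) : List Int → List Int → Int
  | _pre, [] => 0
  | pre, x :: r => (pre.count (p - x) : Int) + AGp p (pre ++ [x]) r

-- A's abstract count over all 21 powers
def AG : List Int → List Int → Int
  | _pre, [] => 0
  | pre, x :: r =>
      ((powseq 1 21).map (fun q => (pre.count (q - x) : Int))).sum + AG (pre ++ [x]) r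

-- the dict holds exactly the multiplicities of pre
def pvInv (d : PySem.Dict Int Int) (pre : List Int) : Prop :=
  ∀ v, d.getD v 0 = (pre.count v : Int)

lemma pvInv_setdefault (d : PySem.Dict Int Int) (pre : List Int) (k : Int)
    (h : pvInv d pre) : pvInv (d.setdefault k 0) pre := by
  intro v
  by_cases hv : v = k
  · subst hv; rw [PySem.Dict.getD_setdefault_self]; exact h v
  · rw [PySem.Dict.getD_eq_get?_getD, PySem.Dict.get?_setdefault_of_ne _ _ hv,
      ← PySem.Dict.getD_eq_get?_getD]
    exact h v

lemma innerA_spec (l : List Int) (x : Int) (d : PySem.Dict Int Int) (pre : List Int)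
    (c p : Int) (h : pvInv d pre) :
    pvInv ((l.foldl (fun s _ => stepInnerA x s) (d, c, p)).1) pre ∧
      (l.foldl (fun s _ => stepInnerA x s) (d, c, p)).2.1 =
        c + ((powseq p l.length).map (fun q => (pre.count (q - x) : Int))).sum := by
  induction l generalizing d c p with
  | nil => exact ⟨h, by simp [powseq]⟩
  | cons a l ih =>
    rw [List.foldl_cons]
    have hsd : pvInv (d.setdefault (p - x) 0) pre := pvInv_setdefault d pre _ h
    have hstep : stepInnerA x (d, c, p) =
        (d.setdefault (p - x) 0, c + (pre.count (p - x) : Int), p * 3) := by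
      unfold stepInnerA
      simp only []
      rw [PySem.Dict.getD_setdefault_self, h (p - x)]
    rw [hstep]
    obtain ⟨h1, h2⟩ := ih (d.setdefault (p - x) 0) (c + (pre.count (p - x) : Int)) (p * 3) hsd
    refine ⟨h1, ?_⟩
    rw [h2]
    simp only [List.length_cons, powseq, List.map_cons, List.sum_cons]
    ring

lemma pvInv_modify (d : PySem.Dict Int Int) (pre : List Int) (x : Int)
    (h : pvInv d pre) : pvInv (d.modify x 0 (· + 1)) (pre ++ [x]) := by
  intro v
  rw [PySem.Dict.getD_modify]
  by_cases hv : v = x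
  · subst hv
    simp [h v, List.count_append]
  · simp [hv, h v, List.count_append, List.count_singleton']
    omega

lemma outerA_spec (xs : List Int) (d : PySem.Dict Int Int) (pre : List Int) (c : Int)
    (h : pvInv d pre) :
    (xs.foldl stepOuterA (d, c)).2 = c + AG pre xs := by
  induction xs generalizing d pre c with
  | nil => simp [AG]
  | cons x xs ih =>
    rw [List.foldl_cons]
    have hlen : (PySem.List.pyRange 0 21 1).length = 21 := by decide
    obtain ⟨h1, h2⟩ := innerA_spec (PySem.List.pyRange 0 21 1) x d pre c 1 h
    have hso : stepOuterA (d, c) x =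
        (((PySem.List.pyRange 0 21 1).foldl (fun s _ => stepInnerA x s) (d, c, 1)).1.modify x 0 (· + 1),
         c + ((powseq 1 (PySem.List.pyRange 0 21 1).length).map
            (fun q => (pre.count (q - x) : Int))).sum) := by
      unfold stepOuterA
      simp only []
      rw [h2]
    rw [hso, ih _ (pre ++ [x]) _ (pvInv_modify _ _ _ h1), hlen]
    simp only [AG]
    ring

lemma solve_eq_AG (N : Int) (wealth : List Int) : solve N wealth = AG [] wealth := by
  unfold solve
  rw [outerA_spec wealth PySem.Dict.empty [] 0 (fun v => by simp [PySem.Dict.getD_empty])]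
  simp

lemma AG_eq_sum_AGp (xs pre : List Int) :
    AG pre xs = ((powseq 1 21).map (fun p => AGp p pre xs)).sum := by
  induction xs generalizing pre with
  | nil => simp [AG, AGp]
  | cons x r ih =>
    simp only [AG, AGp, ih (pre ++ [x]), PySem.List.sum_map_add_int]

lemma singleton_count_sum (r : List Int) (x p : Int) :
    (r.map (fun y => (([x].count (p - y) : Nat) : Int))).sum = (r.count (p - x) : Int) := by
  induction r with
  | nil => simp
  | cons y r ih =>
    rw [List.map_cons, List.sum_cons, ih]
    simp only [List.count_cons, List.count_nil, beq_iff_eq]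
    push_cast
    split_ifs with h1 h2 h2 <;> omega

lemma AGp_eq_cross_add_pairs (p : Int) (xs pre : List Int) :
    AGp p pre xs = (xs.map (fun x => (pre.count (p - x) : Int))).sum + pairsSum p xs := by
  induction xs generalizing pre with
  | nil => simp [AGp, pairsSum]
  | cons x r ih =>
    simp only [AGp, pairsSum, ih (pre ++ [x]), List.map_cons, List.sum_cons]
    have hsplit : (r.map (fun y => ((pre ++ [x]).count (p - y) : Int))).sum =
        (r.map (fun y => (pre.count (p - y) : Int))).sum +
          (r.map (fun y => (([x].count (p - y) : Nat) : Int))).sum := by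
      rw [← PySem.List.sum_map_add_int]
      refine congrArg List.sum (List.map_congr_left ?_)
      intro y _
      rw [List.count_append]
      push_cast
      ring
    rw [hsplit, singleton_count_sum]
    ring

lemma AGp_nil : ∀ (p : Int) (xs : List Int), AGp p [] xs = pairsSum p xs := by
  intro p xs
  rw [AGp_eq_cross_add_pairs]
  simp

lemma sum_ite_point (S : List Int) (t v : Int) :
    ((S.map (fun a => if a = t then v else 0)).sum) = (S.count t : Int) * v := by
  induction S with
  | nil => simp
  | cons a S ih =>
    simp only [List.map_cons, List.sum_cons, ih, List.count_cons]
    by_cases ha : a = t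
    · subst ha; simp; ring
    · simp [ha]

lemma floordiv_choose2_succ (n : Int) :
    PySem.Int.floordiv ((n + 1) * n) 2 = PySem.Int.floordiv (n * (n - 1)) 2 + n := by
  rw [PySem.Int.floordiv_eq_ediv_of_pos (by norm_num : (0:Int) < 2),
    PySem.Int.floordiv_eq_ediv_of_pos (by norm_num : (0:Int) < 2)]
  have h : (n + 1) * n = n * (n - 1) + n * 2 := by ring
  rw [h, Int.add_mul_ediv_right _ _ (by norm_num : (2:Int) ≠ 0)]

lemma hval_nil (p a : Int) : hval [] p a = 0 := by
  unfold hval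
  split_ifs <;> simp [PySem.Int.floordiv]

lemma hval_cons (x : Int) (r : List Int) (p a : Int) :
    hval (x :: r) p a = hval r p a +
      ((if a = x ∧ x ≤ p - x then (r.count (p - x) : Int) else 0) +
       (if a = p - x ∧ p - x < x then (r.count (p - x) : Int) else 0)) := by
  have hc : ∀ b : Int, (((x :: r).count b : Nat) : Int) = (r.count b : Int) + (if b = x then 1 else 0) := by
    intro b
    by_cases hbx : b = x
    · simp [hbx]
    · simp only [List.count_cons, beq_iff_eq]
      rw [if_neg (fun h => hbx h.symm), if_neg hbx]
      simp
  unfold hval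
  rw [hc a, hc (p - a)]
  by_cases h1 : p - a = a
  · rw [if_pos h1, if_pos h1]
    by_cases hax : a = x
    · have hra : r.count (p - x) = r.count a := by rw [show p - x = a by omega]
      rw [if_pos hax, if_pos ⟨hax, by omega⟩, if_neg (by omega : ¬(a = p - x ∧ p - x < x)), hra]
      have he : ((r.count a : Int) + 1) * ((r.count a : Int) + 1 - 1) = ((r.count a : Int) + 1) * (r.count a : Int) := by ring
      rw [he, floordiv_choose2_succ]
      ring
    · rw [if_neg hax, if_neg (by tauto : ¬(a = x ∧ x ≤ p - x)),
        if_neg (by rintro ⟨h2, h3⟩; exact hax (by omega) : ¬(a = p - x ∧ p - x < x))]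
      ring_nf
  · rw [if_neg h1, if_neg h1]
    by_cases h2 : p - a > a
    · rw [if_pos h2, if_pos h2]
      by_cases hax : a = x
      · have hra : r.count (p - x) = r.count (p - a) := by rw [show p - x = p - a by omega]
        rw [if_pos hax, if_neg (by omega : ¬ (p - a = x)), if_pos ⟨hax, by omega⟩,
          if_neg (by omega : ¬(a = p - x ∧ p - x < x)), hra]
        ring
      · by_cases hpa : p - a = x
        · have hra : r.count (p - x) = r.count a := by rw [show p - x = a by omega]
          rw [if_neg hax, if_pos hpa, if_neg (by tauto : ¬(a = x ∧ x ≤ p - x)),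
            if_pos ⟨by omega, by omega⟩, hra]
          ring
        · rw [if_neg hax, if_neg hpa, if_neg (by tauto : ¬(a = x ∧ x ≤ p - x)),
            if_neg (by rintro ⟨hu, hv⟩; exact hpa (by omega) : ¬(a = p - x ∧ p - x < x))]
          ring
    · rw [if_neg h2, if_neg h2, if_neg (by omega : ¬(a = x ∧ x ≤ p - x)),
        if_neg (by omega : ¬(a = p - x ∧ p - x < x))]
      ring

lemma pairs_eq_sum (p : Int) (xs S : List Int) (hnd : S.Nodup)
    (hsub : ∀ y ∈ xs, y ∈ S) :
    ((S.map (fun a => hval xs p a)).sum) = pairsSum p xs := by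
  induction xs with
  | nil =>
    rw [show S.map (fun a => hval [] p a) = S.map (fun _ => (0 : Int)) from
      List.map_congr_left (fun a _ => hval_nil p a)]
    simp [pairsSum]
  | cons x r ih =>
    have hsub' : ∀ y ∈ r, y ∈ S := fun y hy => hsub y (List.mem_cons_of_mem x hy)
    have hx : x ∈ S := hsub x List.mem_cons_self
    simp only [hval_cons]
    rw [PySem.List.sum_map_add_int S (fun a => hval r p a) _, ih hsub',
      PySem.List.sum_map_add_int S (fun a => if a = x ∧ x ≤ p - x then (r.count (p - x) : Int) else 0) _]
    simp only [pairsSum]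
    by_cases hc : x ≤ p - x
    · have e1 : S.map (fun a => if a = x ∧ x ≤ p - x then (r.count (p - x) : Int) else 0)
          = S.map (fun a => if a = x then (r.count (p - x) : Int) else 0) :=
        List.map_congr_left (fun a _ => by by_cases h : a = x <;> simp [h, hc])
      have e2 : S.map (fun a => if a = p - x ∧ p - x < x then (r.count (p - x) : Int) else 0)
          = S.map (fun _ => (0 : Int)) :=
        List.map_congr_left (fun a _ => by rw [if_neg (by omega : ¬(a = p - x ∧ p - x < x))])
      rw [e1, e2, sum_ite_point, List.count_eq_one_of_mem hnd hx]
      simp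
      ring
    · have e1 : S.map (fun a => if a = x ∧ x ≤ p - x then (r.count (p - x) : Int) else 0)
          = S.map (fun _ => (0 : Int)) :=
        List.map_congr_left (fun a _ => by rw [if_neg (by omega : ¬(a = x ∧ x ≤ p - x))])
      have e2 : S.map (fun a => if a = p - x ∧ p - x < x then (r.count (p - x) : Int) else 0)
          = S.map (fun a => if a = p - x then (r.count (p - x) : Int) else 0) :=
        List.map_congr_left (fun a _ => by by_cases h : a = p - x <;> simp [h]; omega)
      rw [e1, e2, sum_ite_point]
      by_cases hm : p - x ∈ S
      · rw [List.count_eq_one_of_mem hnd hm]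
        simp
        ring
      · have hr0 : r.count (p - x) = 0 := List.count_eq_zero.mpr (fun hmem => hm (hsub' _ hmem))
        rw [List.count_eq_zero.mpr hm, hr0]
        simp

lemma itemsB_spec (wealth : List Int) (total p : Int) :
    ((PySem.Dict.counter wealth : PySem.Dict Int Int).items.foldl (fun total aca =>
      if p - aca.1 = aca.1 then
        total + PySem.Int.floordiv (aca.2 * (aca.2 - 1)) 2
      else if p - aca.1 > aca.1 then
        total + aca.2 * (PySem.Dict.counter wealth : PySem.Dict Int Int).getD (p - aca.1) 0
      else total) total) =
      total + ((PySem.Set.ofList wealth).map (fun a => hval wealth p a)).sum := by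
  rw [PySem.Dict.items_counter, List.foldl_map]
  have hfun : (fun (total : Int) (a : Int) =>
      if p - (a, (wealth.count a : Int)).1 = (a, (wealth.count a : Int)).1 then
        total + PySem.Int.floordiv ((a, (wealth.count a : Int)).2 * ((a, (wealth.count a : Int)).2 - 1)) 2
      else if p - (a, (wealth.count a : Int)).1 > (a, (wealth.count a : Int)).1 then
        total + (a, (wealth.count a : Int)).2 * (PySem.Dict.counter wealth : PySem.Dict Int Int).getD (p - (a, (wealth.count a : Int)).1) 0
      else total) = fun total a => total + hval wealth p a := by
    funext total a
    simp only []
    unfold hval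
    rw [PySem.Dict.getD_counter]
    split_ifs <;> ring
  rw [hfun, PySem.List.foldl_add]

lemma outerB_spec (wealth : List Int) (l : List Int) (total p : Int) :
    ((l.foldl (fun st _ => stepB (PySem.Dict.counter wealth) st) (total, p)).1) =
      total + ((powseq p l.length).map
        (fun q => ((PySem.Set.ofList wealth).map (fun a => hval wealth q a)).sum)).sum := by
  induction l generalizing total p with
  | nil => simp [powseq]
  | cons a l ih =>
    rw [List.foldl_cons]
    have hstep : stepB (PySem.Dict.counter wealth) (total, p) =
        (total + ((PySem.Set.ofList wealth).map (fun a => hval wealth p a)).sum, p * 3) := by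
      unfold stepB
      simp only []
      rw [itemsB_spec]
    rw [hstep, ih]
    simp only [List.length_cons, powseq, List.map_cons, List.sum_cons]
    ring

lemma solve_alt_eq (N : Int) (wealth : List Int) :
    solve_alt N wealth = ((powseq 1 21).map
      (fun q => ((PySem.Set.ofList wealth).map (fun a => hval wealth q a)).sum)).sum := by
  unfold solve_alt
  simp only []
  rw [outerB_spec wealth _ 0 1, show (PySem.List.pyRange 0 21 1).length = 21 by decide]
  ring

-- ===== VERDICT (by name: the statement is the Claim_ definition above) =====
theorem solve_spec : Claim_equal_solve := by
  intro N wealth _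
  unfold Spec_solve
  rw [solve_eq_AG, solve_alt_eq, AG_eq_sum_AGp]
  refine congrArg List.sum (List.map_congr_left ?_)
  intro q _
  rw [AGp_nil]
  exact (pairs_eq_sum q wealth (PySem.Set.ofList wealth) (PySem.Set.nodup_ofList wealth)
    (fun y hy => (PySem.Set.mem_ofList wealth y).mpr hy)).symm
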